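-- pv_equiv track=rewrite | github.com/SigismundWu/nlp-data-clean | extracting data v2.py | check_sents
-- ===== SOURCE A (Python) =====
-- def check_sents(data_n1):  # data_n1是个list
--
--     for i in range(len(data_n1) - 1, -1, -1):
--         for index in range(len(data_n1[i])):
--             try:
--                 if data_n1[i][index].islower() & data_n1[i][index + 1].isupper():
--                     del data_n1[i]
--                 else:
--                     pass
--             except:
--                 pass
--
--     return data_n1
-- ===== SOURCE B (Python) =====
-- def check_sents(data_n1):  # same list object, mutated in place
--     data_n1[:] = [s for s in data_n1
--                   if not any(a.islower() and b.isupper() for a, b in zip(s, s[1:]))]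
--     return data_n1
-- ===== Notes on version B (the rewrite author's own statement) =====
-- stated objective: simpler
-- what changed: A's backward index loop with cascading in-place deletions guarded by a blanket try/except is replaced by a single filter: keep exactly the strings with no lowercase-then-uppercase adjacent pair (computed via zip(s, s[1:])), assigned back in place with data_n1[:] = ...
import Mathlib
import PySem

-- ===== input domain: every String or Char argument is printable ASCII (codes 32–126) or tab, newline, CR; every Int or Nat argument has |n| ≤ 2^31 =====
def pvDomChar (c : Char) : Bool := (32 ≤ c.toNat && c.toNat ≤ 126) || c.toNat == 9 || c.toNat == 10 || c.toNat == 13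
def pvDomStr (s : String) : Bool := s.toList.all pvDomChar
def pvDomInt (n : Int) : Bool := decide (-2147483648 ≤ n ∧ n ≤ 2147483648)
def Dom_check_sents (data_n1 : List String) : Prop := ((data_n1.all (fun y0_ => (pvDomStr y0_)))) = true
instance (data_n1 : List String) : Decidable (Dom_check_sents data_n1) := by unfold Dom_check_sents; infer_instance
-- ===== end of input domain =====

-- B replaces A's backward double loop with cascading try/except-guarded deletions by a single
-- in-place filter dropping strings with a lowercase-then-uppercase adjacency (objective: simpler).
-- Both A and B mutate the argument list in place and return the same object; the equivalence
-- proved here is about the returned value (which is also the final in-place content for both).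

-- ===== PORT A =====
-- the try-guarded condition body: s[index].islower() & s[index+1].isupper(); any IndexError is passed
def pvTrig (cs : List Char) (index : Int) : Bool :=
  match PySem.List.pyGet? cs index, PySem.List.pyGet? cs (index + 1) with
  | some c1, some c2 => PySem.Chars.islower c1 && PySem.Chars.isupper c2
  | _, _ => false

-- one inner-loop iteration: re-reads data_n1[i] (except: pass when it no longer exists)
def pvStepA (i : Int) (l : List String) (index : Int) : List String :=
  match PySem.List.pyGet? l i with
  | none => l
  | some s => if pvTrig s.toList index then l.eraseIdx i.toNat else l

def check_sents (data_n1 : List String) : List String :=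
  (PySem.List.pyRange ((data_n1.length : Int) - 1) (-1) (-1)).foldl
    (fun l i =>
      match PySem.List.pyGet? l i with
      | none => l   -- unreachable: range(len(data_n1[i])) with i a valid index
      | some s => (PySem.List.pyRange 0 (s.toList.length : Int) 1).foldl (pvStepA i) l)
    data_n1

-- ===== PORT B =====
def pvBad (s : String) : Bool :=
  (s.toList.zip s.toList.tail).any
    (fun p => PySem.Chars.islower p.1 && PySem.Chars.isupper p.2)

def check_sents_alt (data_n1 : List String) : List String :=
  data_n1.filter (fun s => ! pvBad s)

-- ===== PRECONDITION & SPEC =====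
def Spec_check_sents (data_n1 : List String) (out : List String) : Prop := out = check_sents_alt data_n1
instance (data_n1 : List String) (out : List String) : Decidable (Spec_check_sents data_n1 out) := by unfold Spec_check_sents; infer_instance

-- ===== CLAIM (what is proved, stated in full; the proofs are below) =====
def Claim_equal_check_sents : Prop := ∀ (data_n1 : List String), Dom_check_sents data_n1 → Spec_check_sents data_n1 (check_sents data_n1)

-- ===== LEMMAS AND PROOFS =====

-- Bool helpers
theorem pvBoolT (b : Bool) (h : ¬ b = false) : b = true := by cases b <;> simp_all
theorem pvBoolF (b : Bool) (h : ¬ b = true) : b = false := by cases b <;> simp_all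

-- trigger at a Nat index, as a Bool
def pvTrigN (cs : List Char) (j : Nat) : Bool :=
  match cs[j]?, cs[j+1]? with
  | some a, some b => PySem.Chars.islower a && PySem.Chars.isupper b
  | _, _ => false

theorem pvTrig_natCast (cs : List Char) (j : Nat) :
    pvTrig cs (j : Int) = pvTrigN cs j := by
  unfold pvTrig pvTrigN
  have h1 : PySem.List.pyGet? cs (j : Int) = cs[j]? := PySem.List.pyGet?_natCast cs j
  have h2 : PySem.List.pyGet? cs ((j : Int) + 1) = cs[j+1]? := by
    have := PySem.List.pyGet?_natCast cs (j+1); push_cast at this ⊢; exact this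
  rw [h1, h2]

theorem pvTrigN_iff (cs : List Char) (j : Nat) :
    pvTrigN cs j = true ↔ ∃ h : j + 1 < cs.length,
      (PySem.Chars.islower (cs[j]'(by omega)) && PySem.Chars.isupper (cs[j+1]'h)) = true := by
  unfold pvTrigN
  by_cases hlt : j + 1 < cs.length
  · have hj : j < cs.length := by omega
    rw [List.getElem?_eq_getElem hj, List.getElem?_eq_getElem hlt]
    exact ⟨fun p => ⟨hlt, p⟩, fun ⟨_, p⟩ => p⟩
  · constructor
    · intro h
      exfalso
      rw [List.getElem?_eq_none (show cs.length ≤ j + 1 by omega)] at h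
      cases hg1 : cs[j]? <;> rw [hg1] at h <;> simp at h
    · rintro ⟨h', _⟩; omega

theorem pvZipAny_iff (cs : List Char) (p : Char × Char → Bool) :
    ((cs.zip cs.tail).any p = true) ↔
      ∃ j, ∃ h : j + 1 < cs.length, p (cs[j]'(by omega), cs[j+1]'h) = true := by
  rw [List.any_eq_true]
  constructor
  · rintro ⟨⟨a, b⟩, hmem, hp⟩
    obtain ⟨j, hj, hget⟩ := List.mem_iff_getElem.1 hmem
    have hlen : j + 1 < cs.length := by
      simp [List.length_zip, List.length_tail] at hj; omega
    rw [List.getElem_zip] at hget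
    refine ⟨j, hlen, ?_⟩
    have htail : cs.tail[j]'(by simp [List.length_tail]; omega) = cs[j+1]'hlen := by
      simp [List.getElem_tail]
    have heq : (cs[j]'(by omega), cs[j+1]'hlen) = (a, b) := by rw [← htail]; exact hget
    rw [heq]
    exact hp
  · rintro ⟨j, hlen, hp⟩
    refine ⟨(cs[j]'(by omega), cs[j+1]'hlen), ?_, hp⟩
    rw [List.mem_iff_getElem]
    refine ⟨j, by simp [List.length_zip, List.length_tail]; omega, ?_⟩
    rw [List.getElem_zip]
    simp [List.getElem_tail]

theorem pvBad_iff (s : String) : pvBad s = true ↔ ∃ j, pvTrigN s.toList j = true := by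
  unfold pvBad
  rw [pvZipAny_iff]
  constructor
  · rintro ⟨j, h, hp⟩; exact ⟨j, (pvTrigN_iff _ _).2 ⟨h, hp⟩⟩
  · rintro ⟨j, hp⟩
    obtain ⟨h, hp⟩ := (pvTrigN_iff _ _).1 hp
    exact ⟨j, h, hp⟩

theorem pvBad_false_no_trig (s : String) (h : pvBad s = false) (index : Int)
    (hnn : 0 ≤ index) : pvTrig s.toList index = false := by
  by_contra habs
  have ht := pvBoolT _ habs
  have : pvTrig s.toList ((index.toNat : Nat) : Int) = true := by
    rwa [Int.toNat_of_nonneg hnn]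
  rw [pvTrig_natCast] at this
  have : pvBad s = true := (pvBad_iff s).2 ⟨_, this⟩
  simp [h] at this

-- a step is the identity when the element at i is clean or absent
theorem pvStepA_id (l : List String) (i index : Int)
    (h : ∀ s, PySem.List.pyGet? l i = some s → pvBad s = false)
    (hnn : 0 ≤ index) : pvStepA i l index = l := by
  unfold pvStepA
  cases hget : PySem.List.pyGet? l i with
  | none => rfl
  | some s =>
    simp only
    rw [pvBad_false_no_trig s (h s hget) index hnn]
    simp

theorem pvInner_clean (js : List Int) (l : List String) (i : Int)
    (h : ∀ s, PySem.List.pyGet? l i = some s → pvBad s = false)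
    (hnn : ∀ j ∈ js, 0 ≤ j) : js.foldl (pvStepA i) l = l := by
  induction js with
  | nil => rfl
  | cons j js ih =>
    rw [List.foldl_cons, pvStepA_id l i j h (hnn j (by simp)),
      ih (fun j' hj' => hnn j' (by simp [hj']))]

theorem pvErase_append (pre post : List String) (s : String) :
    (pre ++ s :: post).eraseIdx pre.length = pre ++ post := by
  induction pre with
  | nil => rfl
  | cons x pre ih => simpa [List.eraseIdx] using ih

-- the inner loop on a bad string at position pre.length deletes exactly it
theorem pvInner_bad (pre post : List String) (s : String)
    (hbad : pvBad s = true) (hpost : ∀ t ∈ post, pvBad t = false) :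
    (PySem.List.pyRange 0 (s.toList.length : Int) 1).foldl
      (pvStepA (pre.length : Int)) (pre ++ s :: post) = pre ++ post := by
  obtain ⟨j0, hj0⟩ := (pvBad_iff s).1 hbad
  have hex : ∃ j, pvTrigN s.toList j = true := ⟨j0, hj0⟩
  set k := Nat.find hex with hk
  have hkt : pvTrigN s.toList k = true := Nat.find_spec hex
  have hkmin : ∀ j < k, ¬ pvTrigN s.toList j = true := fun j hj => Nat.find_min hex hj
  obtain ⟨hklen, hkcond⟩ := (pvTrigN_iff _ _).1 hkt
  have hkn : (k : Int) < (s.toList.length : Int) := by exact_mod_cast (by omega : k < s.toList.length)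
  -- split the range at k
  have hsplit1 : PySem.List.pyRange 0 (s.toList.length : Int) 1 =
      PySem.List.pyRange 0 (k : Int) 1 ++ PySem.List.pyRange (k : Int) (s.toList.length : Int) 1 :=
    PySem.List.pyRange_one_append 0 (k : Int) _ (by omega) (le_of_lt hkn)
  have hsplit2 : PySem.List.pyRange (k : Int) (s.toList.length : Int) 1 =
      (k : Int) :: PySem.List.pyRange ((k : Int) + 1) (s.toList.length : Int) 1 :=
    PySem.List.pyRange_one_cons hkn
  rw [hsplit1, hsplit2, List.foldl_append, List.foldl_cons]
  -- indexes below k: no trigger, list unchanged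
  have hgetS : PySem.List.pyGet? (pre ++ s :: post) ((pre.length : Nat) : Int) = some s :=
    PySem.List.pyGet?_append_length pre post s
  have h1 : (PySem.List.pyRange 0 (k : Int) 1).foldl (pvStepA (pre.length : Int)) (pre ++ s :: post)
      = pre ++ s :: post := by
    have : ∀ (js : List Int), (∀ j ∈ js, 0 ≤ j ∧ j < (k : Int)) →
        js.foldl (pvStepA (pre.length : Int)) (pre ++ s :: post) = pre ++ s :: post := by
      intro js hjs
      induction js with
      | nil => rfl
      | cons j js ih =>
        obtain ⟨hj0, hjk⟩ := hjs j (by simp)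
        have hid : pvStepA (pre.length : Int) (pre ++ s :: post) j = pre ++ s :: post := by
          unfold pvStepA
          rw [hgetS]
          have : pvTrig s.toList j = false := by
            by_contra habs
            have ht := pvBoolT _ habs
            have : pvTrig s.toList ((j.toNat : Nat) : Int) = true := by
              rwa [Int.toNat_of_nonneg hj0]
            rw [pvTrig_natCast] at this
            exact hkmin j.toNat (by omega) this
          simp [this]
        rw [List.foldl_cons, hid, ih (fun j' hj' => hjs j' (by simp [hj']))]
    exact this _ (fun j hj => by
      have := (PySem.List.mem_pyRange_one).1 hj; exact ⟨this.1, this.2⟩)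
  rw [h1]
  -- index k: trigger fires, the element is deleted
  have h2 : pvStepA (pre.length : Int) (pre ++ s :: post) (k : Int) = pre ++ post := by
    unfold pvStepA
    rw [hgetS]
    have : pvTrig s.toList (k : Int) = true := by rw [pvTrig_natCast]; exact (pvTrigN_iff _ _).2 ⟨hklen, hkcond⟩
    simp only [this, if_true]
    rw [Int.toNat_natCast, pvErase_append]
  rw [h2]
  -- remaining indexes: the element now at i is clean (or absent), identity
  exact pvInner_clean _ _ _
    (fun t hget => by
      have : PySem.List.pyGet? (pre ++ post) ((pre.length : Int) + 0) = post[0]? :=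
        PySem.List.pyGet?_append_right pre post 0
      rw [add_zero] at this
      rw [this] at hget
      exact hpost t (List.mem_of_getElem? hget))
    (fun j hj => by
      have := (PySem.List.mem_pyRange_one).1 hj; omega)

-- the outer backward loop filters the prefix it has not yet visited
theorem pvOuter (pre post : List String) (hpost : ∀ t ∈ post, pvBad t = false) :
    (PySem.List.pyRange ((pre.length : Int) - 1) (-1) (-1)).foldl
      (fun l i =>
        match PySem.List.pyGet? l i with
        | none => l
        | some s => (PySem.List.pyRange 0 (s.toList.length : Int) 1).foldl (pvStepA i) l)
      (pre ++ post) = pre.filter (fun s => ! pvBad s) ++ post := by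
  induction pre using List.reverseRecOn generalizing post with
  | nil =>
    rw [PySem.List.pyRange_neg_one_eq_nil (by norm_num)]
    simp
  | append_singleton pre s ih =>
    have hlen : ((pre ++ [s]).length : Int) - 1 = (pre.length : Int) := by
      simp
    rw [hlen, PySem.List.pyRange_neg_one_cons (by omega), List.foldl_cons]
    have hre : pre ++ [s] ++ post = pre ++ s :: post := by simp
    rw [hre]
    have hgetS : PySem.List.pyGet? (pre ++ s :: post) ((pre.length : Nat) : Int) = some s :=
      PySem.List.pyGet?_append_length pre post s
    have hstep :
        (match PySem.List.pyGet? (pre ++ s :: post) ((pre.length : Int)) with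
          | none => pre ++ s :: post
          | some t => (PySem.List.pyRange 0 (t.toList.length : Int) 1).foldl
              (pvStepA (pre.length : Int)) (pre ++ s :: post))
        = if pvBad s then pre ++ post else pre ++ s :: post := by
      rw [hgetS]
      by_cases hb : pvBad s = true
      · rw [if_pos hb]
        exact pvInner_bad pre post s hb hpost
      · have hb' : pvBad s = false := pvBoolF _ hb
        rw [if_neg hb]
        exact pvInner_clean _ _ _
          (fun t hget => by rw [hgetS] at hget; cases hget; exact hb')
          (fun j hj => ((PySem.List.mem_pyRange_one).1 hj).1)
    rw [hstep]
    by_cases hb : pvBad s = true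
    · rw [if_pos hb, ih post hpost]
      simp [List.filter_append, hb]
    · have hb' : pvBad s = false := pvBoolF _ hb
      rw [if_neg hb]
      have := ih (s :: post) (by
        intro t ht
        rcases List.mem_cons.1 ht with h | h
        · subst h; exact hb'
        · exact hpost t h)
      rw [this]
      simp [List.filter_append, hb']

-- ===== VERDICT (by name: the statement is the Claim_ definition above) =====
theorem check_sents_spec : Claim_equal_check_sents := by
  intro data_n1 _
  unfold Spec_check_sents check_sents check_sents_alt
  have := pvOuter data_n1 [] (by simp)
  simpa using this
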